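-- pv_equiv track=rewrite | github.com/cirion/skal | skal/lok/utils.py | value_from_level
-- ===== SOURCE A (Python) =====
-- def value_from_level(level):
-- 	if (level < 11):
-- 		return level * 10
-- 	elif (level > 100):
-- 		return 5105 + (level - 100) * 100
-- 	else:
-- 		value = 100;
-- 		temp = 10
-- 		while (temp < level):
-- 			temp += 1
-- 			value += temp
-- 		return value
-- ===== SOURCE B (Python) =====
-- def value_from_level(level):
--     if level < 11:
--         return level * 10
--     elif level > 100:
--         return 5105 + (level - 100) * 100
--     else:
--         return 100 + (level + 11) * (level - 10) // 2
-- ===== Notes on version B (the rewrite author's own statement) =====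
-- stated objective: simpler
-- what changed: The while-loop that sums consecutive levels is replaced by the closed-form arithmetic-series expression using integer floor division.
import Mathlib
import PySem

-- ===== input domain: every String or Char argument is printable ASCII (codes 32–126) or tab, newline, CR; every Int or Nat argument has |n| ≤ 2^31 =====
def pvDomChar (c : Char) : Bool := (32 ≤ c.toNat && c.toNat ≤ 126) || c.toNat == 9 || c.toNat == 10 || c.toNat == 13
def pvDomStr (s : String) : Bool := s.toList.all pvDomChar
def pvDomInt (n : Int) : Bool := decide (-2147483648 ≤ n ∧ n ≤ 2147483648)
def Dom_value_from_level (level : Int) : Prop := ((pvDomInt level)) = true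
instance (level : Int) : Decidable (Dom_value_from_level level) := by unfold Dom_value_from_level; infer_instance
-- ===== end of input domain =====

-- B replaces A's while-loop summation of consecutive levels with the closed-form arithmetic-series value (objective: simpler).

-- ===== PORT A =====
-- the while loop: while temp < level: temp += 1; value += temp
def pvLoopA (level temp value : Int) : Int :=
  if temp < level then pvLoopA level (temp + 1) (value + (temp + 1)) else value
termination_by (level - temp).toNat
decreasing_by omega

def value_from_level (level : Int) : Int :=
  if level < 11 then level * 10
  else if level > 100 then 5105 + (level - 100) * 100
  else pvLoopA level 10 100

-- ===== PORT B =====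
def value_from_level_alt (level : Int) : Int :=
  if level < 11 then level * 10
  else if level > 100 then 5105 + (level - 100) * 100
  else 100 + PySem.Int.floordiv ((level + 11) * (level - 10)) 2

-- ===== PRECONDITION & SPEC =====
def Spec_value_from_level (level : Int) (out : Int) : Prop := out = value_from_level_alt level
instance (level : Int) (out : Int) : Decidable (Spec_value_from_level level out) := by unfold Spec_value_from_level; infer_instance

-- ===== CLAIM (what is proved, stated in full; the proofs are below) =====
def Claim_equal_value_from_level : Prop := ∀ (level : Int), Dom_value_from_level level → Spec_value_from_level level (value_from_level level)

-- ===== LEMMAS AND PROOFS =====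
-- loop invariant: twice the loop's result is 2*value + (level+temp+1)*(level-temp)
theorem pvLoopA_two_mul (level temp value : Int) (h : temp ≤ level) :
    2 * pvLoopA level temp value = 2 * value + (level + temp + 1) * (level - temp) := by
  rw [pvLoopA]
  split_ifs with hlt
  · have := pvLoopA_two_mul level (temp + 1) (value + (temp + 1)) (by omega)
    rw [this]; ring
  · have : temp = level := by omega
    subst this; ring
termination_by (level - temp).toNat
decreasing_by omega

-- ===== VERDICT (by name: the statement is the Claim_ definition above) =====
theorem value_from_level_spec : Claim_equal_value_from_level := by
  intro level _
  unfold Spec_value_from_level value_from_level value_from_level_alt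
  split_ifs with h1 h2
  · rfl
  · rfl
  · have h10 : (10 : Int) ≤ level := by omega
    have hloop := pvLoopA_two_mul level 10 100 h10
    have hfd : PySem.Int.floordiv ((level + 11) * (level - 10)) 2 = pvLoopA level 10 100 - 100 := by
      rw [PySem.Int.floordiv_eq_iff_of_pos (by omega)]
      constructor <;> nlinarith [hloop]
    omega
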